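-- pv_equiv track=rewrite | github.com/brcsomnath/Aranyani | src/fdt_test.py | find_ancestor_indices
-- ===== SOURCE A (Python) =====
-- def find_ancestor_indices(leaf_index):
--   ancestor_indices = []
--   while leaf_index > 1:
--     flag = leaf_index % 2 == 0
--     leaf_index = leaf_index // 2  # Integer division
--     if flag:
--       ancestor_indices.append(leaf_index)
--     else:
--       ancestor_indices.append(-leaf_index)
--   return ancestor_indices
-- ===== SOURCE B (Python) =====
-- def find_ancestor_indices(leaf_index):
--   if leaf_index <= 1:
--     return []
--   width = leaf_index.bit_length()
--   return [(leaf_index >> (k + 1)) if (leaf_index >> k) % 2 == 0 else -(leaf_index >> (k + 1))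
--           for k in range(width - 1)]
-- ===== Notes on version B (the rewrite author's own statement) =====
-- stated objective: alternative
-- what changed: Replaced the destructive halving while-loop with an accumulator by a single list comprehension over the bit positions of leaf_index (bit_length and shifts), computing each signed ancestor directly as +/-(leaf_index >> (k+1)).
import Mathlib
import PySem

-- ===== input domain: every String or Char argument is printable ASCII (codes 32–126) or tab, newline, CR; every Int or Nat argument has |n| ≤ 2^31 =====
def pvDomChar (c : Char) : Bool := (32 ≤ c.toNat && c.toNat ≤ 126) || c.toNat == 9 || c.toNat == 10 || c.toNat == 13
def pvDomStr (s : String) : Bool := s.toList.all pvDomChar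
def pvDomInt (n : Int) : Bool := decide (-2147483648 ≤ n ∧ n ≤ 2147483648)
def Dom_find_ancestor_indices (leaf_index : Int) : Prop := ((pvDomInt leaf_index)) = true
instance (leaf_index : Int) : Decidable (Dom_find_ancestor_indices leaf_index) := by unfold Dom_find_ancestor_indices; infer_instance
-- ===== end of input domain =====

-- B replaces A's destructive halving loop with a one-shot comprehension over the bit positions of
-- leaf_index (bit_length + shifts); alternative decomposition, same asymptotic cost.

-- ===== PORT A =====
-- the while-loop of A: state is (leaf_index, ancestor_indices); append at the end of the list
def find_ancestor_indices_loop (leaf_index : Int) (acc : List Int) : List Int :=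
  if _h : leaf_index > 1 then
    find_ancestor_indices_loop (PySem.Int.floordiv leaf_index 2)
      (acc ++ [if PySem.Int.mod leaf_index 2 == 0 then PySem.Int.floordiv leaf_index 2
               else -(PySem.Int.floordiv leaf_index 2)])
  else acc
termination_by leaf_index.toNat
decreasing_by
  have : PySem.Int.floordiv leaf_index 2 = leaf_index / 2 :=
    PySem.Int.floordiv_eq_ediv_of_pos (by omega)
  simp only [this]; omega

def find_ancestor_indices (leaf_index : Int) : List Int :=
  find_ancestor_indices_loop leaf_index []

-- ===== PORT B =====
-- Source B: a list comprehension over k in range(bit_length - 1); entry k is ±(leaf_index >> (k+1)),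
-- signed by the parity of leaf_index >> k.  Python's n >> k is Lean's n >>> k exactly.
def find_ancestor_indices_alt (leaf_index : Int) : List Int :=
  if leaf_index ≤ 1 then []
  else
    let width := PySem.Int.bitLength leaf_index
    (List.range (width - 1)).map (fun (k : Nat) =>
      if PySem.Int.mod (leaf_index >>> k) 2 == 0 then leaf_index >>> (k + 1)
      else -(leaf_index >>> (k + 1)))

-- ===== PRECONDITION & SPEC =====
def Spec_find_ancestor_indices (leaf_index : Int) (out : List Int) : Prop := out = find_ancestor_indices_alt leaf_index
instance (leaf_index : Int) (out : List Int) : Decidable (Spec_find_ancestor_indices leaf_index out) := by unfold Spec_find_ancestor_indices; infer_instance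

-- ===== CLAIM (what is proved, stated in full; the proofs are below) =====
def Claim_equal_find_ancestor_indices : Prop := ∀ (leaf_index : Int), Dom_find_ancestor_indices leaf_index → Spec_find_ancestor_indices leaf_index (find_ancestor_indices leaf_index)

-- ===== LEMMAS AND PROOFS =====
-- B's comprehension satisfies the same head/tail recurrence as A's loop body.
theorem find_ancestor_indices_alt_step (li : Int) (h : li > 1) :
    find_ancestor_indices_alt li =
      (if PySem.Int.mod li 2 == 0 then PySem.Int.floordiv li 2
       else -(PySem.Int.floordiv li 2)) ::
        find_ancestor_indices_alt (PySem.Int.floordiv li 2) := by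
  have hfd : PySem.Int.floordiv li 2 = li / 2 :=
    PySem.Int.floordiv_eq_ediv_of_pos (by omega)
  -- work with the Nat form n of li
  obtain ⟨n, rfl⟩ : ∃ n : Nat, li = (n : Int) := ⟨li.toNat, by omega⟩
  have hn : 2 ≤ n := by exact_mod_cast h
  have hcast : (n : Int) / 2 = ((n / 2 : Nat) : Int) := by omega
  have hshift : ∀ (m k : Nat), (m : Int) >>> k = ((m >>> k : Nat) : Int) := by
    intro m k; simp [Int.shiftRight_eq]
  -- bit_length recurrence
  have hbl : PySem.Int.bitLength (n : Int) = PySem.Int.bitLength ((n / 2 : Nat) : Int) + 1 := by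
    have := PySem.Int.bitLength_of_pos (n := (n : Int)) (by omega)
    rw [hfd, hcast] at this; exact this
  have hhalfpos : 1 ≤ n / 2 := by omega
  have hblhalf : 1 ≤ PySem.Int.bitLength ((n / 2 : Nat) : Int) := by
    rcases Nat.lt_or_ge (n / 2) 2 with h2 | h2
    · have : n / 2 = 1 := by omega
      rw [this]; decide
    · have := PySem.Int.bitLength_of_pos (n := ((n / 2 : Nat) : Int)) (by omega)
      omega
  set f : Nat → Int := fun k =>
      if PySem.Int.mod ((n : Int) >>> k) 2 == 0 then (n : Int) >>> (k + 1)
      else -((n : Int) >>> (k + 1)) with hf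
  have hlhs : find_ancestor_indices_alt (n : Int) =
      (List.range (PySem.Int.bitLength ((n / 2 : Nat) : Int))).map f := by
    rw [find_ancestor_indices_alt, if_neg (by omega)]
    simp only [hbl, Nat.add_sub_cancel]
    rfl
  -- shift-composition: shifting n by k+1 is shifting n/2 by k
  have hdivshift : ∀ k : Nat, n >>> (k + 1) = (n / 2) >>> k := by
    intro k
    simp [Nat.shiftRight_eq_div_pow, Nat.div_div_eq_div_mul, pow_succ, Nat.mul_comm]
  rw [hlhs,
      show PySem.Int.bitLength ((n / 2 : Nat) : Int) =
        (PySem.Int.bitLength ((n / 2 : Nat) : Int) - 1) + 1 by omega,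
      List.range_succ_eq_map, List.map_cons, List.map_map]
  congr 1
  · -- heads agree: f 0 is A's signed parent
    simp only [hf, hshift]
    rw [show n >>> 0 = n from rfl, show n >>> (0 + 1) = n / 2 by simpa using hdivshift 0,
        hfd, hcast]
  · -- tails agree
    rw [hfd, hcast, find_ancestor_indices_alt]
    rcases Nat.lt_or_ge (n / 2) 2 with h2 | h2
    · have hone : n / 2 = 1 := by omega
      rw [if_pos (by rw [hone]; decide)]
      have hb1 : PySem.Int.bitLength ((n / 2 : Nat) : Int) = 1 := by rw [hone]; decide
      simp only [hb1, Nat.sub_self, List.range_zero, List.map_nil]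
    · rw [if_neg (by omega)]
      apply List.map_congr_left
      intro k _
      simp only [Function.comp, hf, hshift, Nat.succ_eq_add_one, hdivshift]

-- A's accumulator loop produces the accumulator followed by B's comprehension.
theorem find_ancestor_indices_loop_eq (leaf_index : Int) (acc : List Int) :
    find_ancestor_indices_loop leaf_index acc = acc ++ find_ancestor_indices_alt leaf_index := by
  induction leaf_index, acc using find_ancestor_indices_loop.induct with
  | case1 li acc h ih =>
    simp only [dite_eq_ite] at ih
    rw [find_ancestor_indices_loop, dif_pos h, ih, find_ancestor_indices_alt_step li h]
    simp
  | case2 li acc h =>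
    rw [find_ancestor_indices_loop, dif_neg h,
        find_ancestor_indices_alt, if_pos (by omega)]
    simp

-- ===== VERDICT (by name: the statement is the Claim_ definition above) =====
theorem find_ancestor_indices_spec : Claim_equal_find_ancestor_indices := by
  intro leaf_index _
  unfold Spec_find_ancestor_indices find_ancestor_indices
  simpa using find_ancestor_indices_loop_eq leaf_index []
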